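-- pv_equiv track=rewrite | github.com/E-Aho/AdventOfCode2020 | Days/09/Day09.py | get_invalid_numbers
-- ===== SOURCE A (Python) =====
-- from collections import defaultdict
--
-- def get_invalid_numbers(list_of_numbers: list, l: int):
--     numbers_to_check = []
--     running_sums = defaultdict(int)
--     list_of_non_sums = []
--
--     numbers_to_check.append(list_of_numbers.pop(0))
--
--     while len(list_of_numbers) > 0:
--         if len(numbers_to_check) < l:
--             n = list_of_numbers.pop(0)
--             for m in numbers_to_check:
--                 running_sums[m+n] += 1
--             numbers_to_check.append(n)
--         else:
--             n = list_of_numbers.pop(0)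
--             if running_sums[n] <= 0:
--                 list_of_non_sums.append(n)
--
--             m = numbers_to_check.pop(0)
--             for k in numbers_to_check:
--                 running_sums[m+k] -= 1
--                 running_sums[n+k] += 1
--             numbers_to_check.append(n)
--
--     return list_of_non_sums
-- ===== SOURCE B (Python) =====
-- def get_invalid_numbers(list_of_numbers: list, l: int):
--     window = [list_of_numbers.pop(0)]
--     result = []
--     while list_of_numbers:
--         n = list_of_numbers.pop(0)
--         if len(window) >= l:
--             if not any(n - m in window and (n - m != m or window.count(m) > 1)
--                        for m in window):
--                 result.append(n)
--             window.pop(0)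
--         window.append(n)
--     return result
-- ===== Notes on version B (the rewrite author's own statement) =====
-- stated objective: simpler
-- what changed: Drops A's incrementally maintained running-sums counter dict entirely: B keeps only the window and, for each new number once the window is full, directly scans the window for a pair of positions summing to it (membership test plus a count for the n == 2m duplicate case).
import Mathlib
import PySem

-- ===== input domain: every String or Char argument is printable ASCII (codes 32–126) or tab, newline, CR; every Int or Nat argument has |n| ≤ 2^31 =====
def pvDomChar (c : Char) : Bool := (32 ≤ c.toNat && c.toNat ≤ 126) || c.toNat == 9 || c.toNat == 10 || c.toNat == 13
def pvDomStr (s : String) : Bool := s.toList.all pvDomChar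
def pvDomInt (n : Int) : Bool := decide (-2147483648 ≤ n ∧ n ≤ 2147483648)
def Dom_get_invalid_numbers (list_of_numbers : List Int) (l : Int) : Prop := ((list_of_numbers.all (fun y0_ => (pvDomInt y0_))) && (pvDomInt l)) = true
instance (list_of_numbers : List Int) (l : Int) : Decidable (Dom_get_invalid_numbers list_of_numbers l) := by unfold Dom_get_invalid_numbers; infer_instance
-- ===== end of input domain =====

-- B replaces A's incrementally maintained running-sums counter dict with a direct per-step
-- pair scan of the current window (objective: simpler). Both A and B pop list_of_numbers
-- empty in place (the same mutation); the equivalence proved is about the return value.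

-- ===== PORT A =====
-- loop state: remaining input, numbers_to_check (window), running_sums, list_of_non_sums.
-- running_sums is the defaultdict(int): reads are `getD _ 0`, `+= 1`/`-= 1` are `modify _ 0 (…)`
-- (the defaultdict's silent insertion of a 0 value on a read never changes any later read).
def pvALoop (rest : List Int) (w : List Int) (rs : PySem.Dict Int Int) (res : List Int) (l : Int) : List Int :=
  match rest with
  | [] => res
  | n :: rest' =>
    if (w.length : Int) < l then
      pvALoop rest' (w ++ [n]) (w.foldl (fun d m => d.modify (m + n) 0 (· + 1)) rs) res l
    else
      let res' := if rs.getD n 0 ≤ 0 then res ++ [n] else res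
      match w with
      | [] => res'   -- numbers_to_check.pop(0) would raise; unreachable (the window is never empty)
      | m :: ws =>
        pvALoop rest' (ws ++ [n])
          (ws.foldl (fun d k => (d.modify (m + k) 0 (· - 1)).modify (n + k) 0 (· + 1)) rs)
          res' l

def get_invalid_numbers (list_of_numbers : List Int) (l : Int) : List Int :=
  match list_of_numbers with
  | [] => []   -- Python: list_of_numbers.pop(0) raises IndexError; excluded by Pre_
  | x :: rest => pvALoop rest [x] PySem.Dict.empty [] l

-- ===== PORT B =====
-- any(n - m in window and (n - m != m or window.count(m) > 1) for m in window)
def pvHasPair (w : List Int) (n : Int) : Bool :=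
  w.any (fun m => decide ((n - m) ∈ w) && (decide (n - m ≠ m) || decide (1 < w.count m)))

def pvBLoop (rest : List Int) (w : List Int) (res : List Int) (l : Int) : List Int :=
  match rest with
  | [] => res
  | n :: rest' =>
    if l ≤ (w.length : Int) then
      let res' := if ¬ pvHasPair w n then res ++ [n] else res
      pvBLoop rest' (w.drop 1 ++ [n]) res' l    -- window.pop(0); window.append(n)
    else
      pvBLoop rest' (w ++ [n]) res l

def get_invalid_numbers_alt (list_of_numbers : List Int) (l : Int) : List Int :=
  match list_of_numbers with
  | [] => []   -- Python: list_of_numbers.pop(0) raises IndexError; excluded by Pre_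
  | x :: rest => pvBLoop rest [x] [] l

-- ===== PRECONDITION & SPEC =====
-- Pre_ excludes only the empty list, on which both Pythons raise IndexError at the first pop.
def Pre_get_invalid_numbers (list_of_numbers : List Int) (l : Int) : Prop :=
  list_of_numbers ≠ []
instance (list_of_numbers : List Int) (l : Int) : Decidable (Pre_get_invalid_numbers list_of_numbers l) := by unfold Pre_get_invalid_numbers; infer_instance

def pvWitness_get_invalid_numbers : List Int × Int := ([35, 20, 15, 25, 47, 40, 62, 55, 65, 95], 5)

def Spec_get_invalid_numbers (list_of_numbers : List Int) (l : Int) (out : List Int) : Prop := out = get_invalid_numbers_alt list_of_numbers l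
instance (list_of_numbers : List Int) (l : Int) (out : List Int) : Decidable (Spec_get_invalid_numbers list_of_numbers l out) := by unfold Spec_get_invalid_numbers; infer_instance

-- ===== CLAIM (what is proved, stated in full; the proofs are below) =====
def Claim_equal_get_invalid_numbers : Prop := ∀ (list_of_numbers : List Int) (l : Int), Dom_get_invalid_numbers list_of_numbers l → Pre_get_invalid_numbers list_of_numbers l → Spec_get_invalid_numbers list_of_numbers l (get_invalid_numbers list_of_numbers l)

-- ===== LEMMAS AND PROOFS =====

-- number of index pairs i < j of w with w[i] + w[j] = s
def pvPairCount (w : List Int) (s : Int) : Int :=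
  match w with
  | [] => 0
  | m :: ws => (ws.count (s - m) : Int) + pvPairCount ws s

lemma pvPairCount_nonneg (w : List Int) (s : Int) : 0 ≤ pvPairCount w s := by
  induction w with
  | nil => simp [pvPairCount]
  | cons m ws ih => have := Int.natCast_nonneg (ws.count (s - m)); simp [pvPairCount]; omega

lemma pvGetD_modify_add1 (d : PySem.Dict Int Int) (key s : Int) :
    (d.modify key 0 (· + 1)).getD s 0 = d.getD s 0 + (if s = key then 1 else 0) := by
  rw [PySem.Dict.getD_modify]
  split_ifs with h
  · simp [h]
  · simp

lemma pvGetD_modify_sub1 (d : PySem.Dict Int Int) (key s : Int) :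
    (d.modify key 0 (· - 1)).getD s 0 = d.getD s 0 - (if s = key then 1 else 0) := by
  rw [PySem.Dict.getD_modify]
  split_ifs with h
  · simp [h]
  · simp

lemma pvPairCount_append (w : List Int) (n s : Int) :
    pvPairCount (w ++ [n]) s = pvPairCount w s + (w.count (s - n) : Int) := by
  induction w with
  | nil => simp [pvPairCount]
  | cons m ws ih =>
    simp only [List.cons_append, pvPairCount, ih, List.count_append,
      List.count_cons, List.count_nil, beq_iff_eq]
    split_ifs <;> push_cast <;> omega

-- the grow-phase update loop: `for m in numbers_to_check: running_sums[m+n] += 1`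
lemma pvGetD_foldl_inc (w : List Int) (d : PySem.Dict Int Int) (n s : Int) :
    (w.foldl (fun d m => d.modify (m + n) 0 (· + 1)) d).getD s 0
      = d.getD s 0 + (w.count (s - n) : Int) := by
  induction w generalizing d with
  | nil => simp
  | cons m ws ih =>
    simp only [List.foldl_cons, ih, pvGetD_modify_add1, List.count_cons, beq_iff_eq]
    split_ifs <;> push_cast <;> omega

-- the slide-phase update loop: `for k in numbers_to_check: running_sums[m+k] -= 1; running_sums[n+k] += 1`
lemma pvGetD_foldl_dec_inc (ws : List Int) (d : PySem.Dict Int Int) (m n s : Int) :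
    (ws.foldl (fun d k => (d.modify (m + k) 0 (· - 1)).modify (n + k) 0 (· + 1)) d).getD s 0
      = d.getD s 0 - (ws.count (s - m) : Int) + (ws.count (s - n) : Int) := by
  induction ws generalizing d with
  | nil => simp
  | cons k ks ih =>
    simp only [List.foldl_cons, ih, pvGetD_modify_add1, pvGetD_modify_sub1,
      List.count_cons, beq_iff_eq]
    split_ifs <;> push_cast <;> omega

lemma pvPairCount_pos_iff (w : List Int) (n : Int) :
    0 < pvPairCount w n ↔ ∃ m ∈ w, (n - m) ∈ w ∧ (n - m ≠ m ∨ 2 ≤ w.count m) := by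
  induction w with
  | nil => simp [pvPairCount]
  | cons m ws ih =>
    have hnn := pvPairCount_nonneg ws n
    have hcount : (0 < pvPairCount (m :: ws) n) ↔ ((n - m) ∈ ws ∨ 0 < pvPairCount ws n) := by
      simp only [pvPairCount]
      rw [← List.count_pos_iff]
      omega
    rw [hcount]
    constructor
    · rintro (hmem | hpos)
      · refine ⟨m, List.mem_cons_self .., List.mem_cons_of_mem _ hmem, ?_⟩
        by_cases he : n - m = m
        · right
          rw [List.count_cons_self]
          have : 1 ≤ ws.count m := List.count_pos_iff.mpr (he ▸ hmem)
          omega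
        · exact Or.inl he
      · obtain ⟨x, hx, hnx, hc⟩ := ih.mp hpos
        refine ⟨x, List.mem_cons_of_mem _ hx, List.mem_cons_of_mem _ hnx, ?_⟩
        rcases hc with h | h
        · exact Or.inl h
        · right
          have hle : ws.count x ≤ (m :: ws).count x := by
            rw [List.count_cons]; exact Nat.le_add_right _ _
          omega
    · rintro ⟨x, hx, hnx, hc⟩
      rcases List.mem_cons.mp hx with rfl | hxw
      · -- the witness element is the head
        by_cases hns : (n - x) ∈ ws
        · exact Or.inl hns
        · exfalso
          have he : n - x = x := by
            rcases List.mem_cons.mp hnx with h | h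
            · exact h
            · exact absurd h hns
          rcases hc with h | h
          · exact h he
          · rw [List.count_cons_self] at h
            have : x ∈ ws := List.count_pos_iff.mp (by omega)
            exact hns (by rw [he]; exact this)
      · -- the witness element is in the tail
        by_cases hns : (n - x) ∈ ws
        · by_cases he : n - x = x
          · by_cases hm : m = x
            · left; rw [hm, he]; exact hxw
            · right
              apply ih.mpr
              refine ⟨x, hxw, hns, ?_⟩
              rcases hc with h | h
              · exact Or.inl h
              · right; rwa [List.count_cons_of_ne (fun hh => hm hh)] at h
          · right; exact ih.mpr ⟨x, hxw, hns, Or.inl he⟩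
        · have he : n - x = m := by
            rcases List.mem_cons.mp hnx with h | h
            · exact h
            · exact absurd h hns
          left
          have hx2 : n - m = x := by omega
          rw [hx2]; exact hxw

lemma pvHasPair_iff (w : List Int) (n : Int) :
    pvHasPair w n = true ↔ ∃ m ∈ w, (n - m) ∈ w ∧ (n - m ≠ m ∨ 2 ≤ w.count m) := by
  simp only [pvHasPair, List.any_eq_true, Bool.and_eq_true, Bool.or_eq_true,
    decide_eq_true_eq]
  constructor
  · rintro ⟨m, hm, hmem, hc⟩
    refine ⟨m, hm, hmem, ?_⟩
    rcases hc with h | h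
    · exact Or.inl h
    · exact Or.inr (by omega)
  · rintro ⟨m, hm, hmem, hc⟩
    refine ⟨m, hm, hmem, ?_⟩
    rcases hc with h | h
    · exact Or.inl h
    · exact Or.inr (by omega)

-- A's membership test `running_sums[n] <= 0` is exactly B's "no pair in the window sums to n"
lemma pvCheck_eq (w : List Int) (n : Int) (rs : PySem.Dict Int Int)
    (hinv : ∀ s, rs.getD s 0 = pvPairCount w s) :
    (rs.getD n 0 ≤ 0) ↔ pvHasPair w n = false := by
  rw [hinv n, ← Bool.not_eq_true, pvHasPair_iff, ← pvPairCount_pos_iff]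
  have hnn := pvPairCount_nonneg w n
  omega

-- main loop invariant: running_sums reads back the window's pair counts
lemma pvLoop_eq (rest : List Int) : ∀ (w : List Int) (rs : PySem.Dict Int Int)
    (res : List Int) (l : Int), w ≠ [] → (∀ s, rs.getD s 0 = pvPairCount w s) →
    pvALoop rest w rs res l = pvBLoop rest w res l := by
  induction rest with
  | nil => intro w rs res l _ _; rfl
  | cons n rest' ih =>
    intro w rs res l hw hinv
    simp only [pvALoop, pvBLoop]
    by_cases h : (w.length : Int) < l
    · rw [if_pos h, if_neg (show ¬ l ≤ (w.length : Int) by omega)]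
      apply ih
      · simp
      · intro s
        rw [pvGetD_foldl_inc, hinv s, pvPairCount_append]
    · obtain ⟨m, ws, rfl⟩ : ∃ m ws, w = m :: ws := by
        cases w with
        | nil => exact absurd rfl hw
        | cons a b => exact ⟨a, b, rfl⟩
      rw [if_neg h, if_pos (show l ≤ ((m :: ws).length : Int) by omega)]
      have hb : (rs.getD n 0 ≤ 0) ↔ (pvHasPair (m :: ws) n = false) := pvCheck_eq _ n rs hinv
      have hres : (if rs.getD n 0 ≤ 0 then res ++ [n] else res)
          = (if ¬ pvHasPair (m :: ws) n then res ++ [n] else res) := by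
        by_cases hc : rs.getD n 0 ≤ 0
        · simp [hc, hb.mp hc]
        · have ht : pvHasPair (m :: ws) n = true := by
            cases hpv : pvHasPair (m :: ws) n with
            | false => exact absurd (hb.mpr hpv) hc
            | true => rfl
          simp [hc, ht]
      simp only [List.drop_one, List.tail_cons]
      rw [hres]
      apply ih
      · simp
      · intro s
        rw [pvGetD_foldl_dec_inc, hinv s, pvPairCount_append]
        simp only [pvPairCount]
        ring

-- ===== VERDICT (by name: the statement is the Claim_ definition above) =====
theorem get_invalid_numbers_spec : Claim_equal_get_invalid_numbers := by
  intro xs l _ hpre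
  unfold Spec_get_invalid_numbers
  match xs, hpre with
  | x :: rest, _ =>
    simp only [get_invalid_numbers, get_invalid_numbers_alt]
    exact pvLoop_eq rest [x] _ [] l (by simp) (fun s => by simp [pvPairCount])
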